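-- pv_equiv track=rewrite | github.com/BartTheBartender/subgroups | python/plotter.py | elements
-- ===== SOURCE A (Python) =====
-- def elements(tc):
--     def elements(tc, buffer, element, index):
--         if index == len(tc):
--             buffer.append(" ".join(str(i) for i in element))
--         else:
--             for i in range(tc[index]):
--                 element[index] = i
--                 elements(tc, buffer, element, index + 1)
--
--     buffer = []
--     element = [0] * len(tc)
--     elements(tc, buffer, element, 0)
--     return buffer
-- ===== SOURCE B (Python) =====
-- def elements(tc):
--     if any(n <= 0 for n in tc):
--         return []
--     tuples = [[]]
--     for n in tc:
--         tuples = [t + [i] for t in tuples for i in range(n)]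
--     return [" ".join(str(i) for i in t) for t in tuples]
-- ===== Notes on version B (the rewrite author's own statement) =====
-- stated objective: idiomatic
-- what changed: Replaces the recursive backtracking over a mutable index vector with an iterative fold that extends a list of tuples by one coordinate per pass, then joins each tuple.
import Mathlib
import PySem

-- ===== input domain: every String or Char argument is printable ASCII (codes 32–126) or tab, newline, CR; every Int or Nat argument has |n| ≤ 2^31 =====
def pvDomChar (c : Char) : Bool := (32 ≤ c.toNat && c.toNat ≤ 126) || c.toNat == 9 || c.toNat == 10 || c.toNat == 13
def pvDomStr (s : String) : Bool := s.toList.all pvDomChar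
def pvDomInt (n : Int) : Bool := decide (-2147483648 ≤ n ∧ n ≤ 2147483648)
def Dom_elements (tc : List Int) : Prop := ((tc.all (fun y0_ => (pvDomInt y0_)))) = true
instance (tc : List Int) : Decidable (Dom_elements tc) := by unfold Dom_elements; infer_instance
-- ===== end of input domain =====

-- B replaces A's recursive backtracking over a mutable index vector by an iterative
-- one-coordinate-per-pass product fold (idiomatic; same cost).

-- ===== PORT A =====
-- " ".join(str(i) for i in element)
def pvJoinSp (element : List Int) : String :=
  PySem.Str.join " " (element.map PySem.Int.toStr)

-- inner recursive 'elements(tc, buffer, element, index)': the remaining suffix of tc stands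
-- for the 'index == len(tc)' test ([] ↔ index = len(tc)) and 'tc[index]' (its head);
-- the mutable (buffer, element) pair is threaded as state.
def elementsGo (rest : List Int) (index : Nat) (buffer : List String) (element : List Int) :
    List String × List Int :=
  match rest with
  | [] => (buffer ++ [pvJoinSp element], element)
  | n :: rest' =>
      (PySem.List.pyRange 0 n 1).foldl
        (fun st i => elementsGo rest' (index + 1) st.1 (st.2.set index i)) (buffer, element)

def elements (tc : List Int) : List String :=
  (elementsGo tc 0 [] (List.replicate tc.length 0)).1

-- ===== PORT B =====
def elements_alt (tc : List Int) : List String :=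
  if tc.any (fun n => decide (n ≤ 0)) then [] else
  let tuples :=
    tc.foldl
      (fun ts n => ts.flatMap (fun t => (PySem.List.pyRange 0 n 1).map (fun i => t ++ [i])))
      [[]]
  tuples.map pvJoinSp

-- ===== PRECONDITION & SPEC =====
def Spec_elements (tc : List Int) (out : List String) : Prop := out = elements_alt tc
instance (tc : List Int) (out : List String) : Decidable (Spec_elements tc out) := by
  unfold Spec_elements; infer_instance

-- ===== CLAIM (what is proved, stated in full; the proofs are below) =====
def Claim_equal_elements : Prop := ∀ (tc : List Int), Dom_elements tc → Spec_elements tc (elements tc)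

-- ===== LEMMAS AND PROOFS =====

-- the product list both programs enumerate, first coordinate slowest
def pvProd (tc : List Int) : List (List Int) :=
  tc.foldr (fun n acc => (PySem.List.pyRange 0 n 1).flatMap (fun i => acc.map (i :: ·))) [[]]

lemma elementsGo_spec (rest : List Int) :
    ∀ (p z : List Int) (buffer : List String), z.length = rest.length →
      (elementsGo rest p.length buffer (p ++ z)).1
          = buffer ++ (pvProd rest).map (fun s => pvJoinSp (p ++ s)) ∧
      ∃ z', z'.length = z.length ∧ (elementsGo rest p.length buffer (p ++ z)).2 = p ++ z' := by
  induction rest with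
  | nil =>
      intro p z buffer hz
      have hz0 : z = [] := List.length_eq_zero_iff.mp hz
      subst hz0
      exact ⟨by simp [elementsGo, pvProd], [], rfl, by simp [elementsGo]⟩
  | cons n rest' ih =>
      intro p z buffer hz
      match z, hz with
      | a :: z2, hz =>
        simp only [List.length_cons, List.length_cons] at hz
        have hz2 : z2.length = rest'.length := by omega
        -- inner induction on the range list
        suffices H : ∀ (l : List Int) (buffer : List String) (c : Int) (z2 : List Int),
            z2.length = rest'.length →
            (l.foldl (fun st i => elementsGo rest' (p.length + 1) st.1 (st.2.set p.length i))
                (buffer, p ++ c :: z2)).1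
              = buffer ++ l.flatMap
                  (fun i => (pvProd rest').map (fun s => pvJoinSp (p ++ i :: s))) ∧
            ∃ c' z2', z2'.length = z2.length ∧
              (l.foldl (fun st i => elementsGo rest' (p.length + 1) st.1 (st.2.set p.length i))
                (buffer, p ++ c :: z2)).2 = p ++ c' :: z2' by
          have := H (PySem.List.pyRange 0 n 1) buffer a z2 hz2
          constructor
          · simpa [elementsGo, pvProd, List.map_flatMap] using this.1
          · obtain ⟨c', z2', hlen, heq⟩ := this.2
            exact ⟨c' :: z2', by simp [hlen, hz2], by simpa [elementsGo] using heq⟩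
        intro l
        induction l with
        | nil => intro buffer c z2 hz2; exact ⟨by simp, c, z2, rfl, rfl⟩
        | cons i l' ihl =>
            intro buffer c z2 hz2
            have hset : (p ++ c :: z2).set p.length i = (p ++ [i]) ++ z2 := by
              simp
            have hstep := ih (p ++ [i]) z2 buffer (by omega)
            simp only [List.length_append, List.length_cons, List.length_nil] at hstep
            obtain ⟨h1, z2', hlen', h2⟩ := hstep
            have hrec : elementsGo rest' (p.length + 1) buffer ((p ++ [i]) ++ z2)
                = (buffer ++ (pvProd rest').map (fun s => pvJoinSp (p ++ i :: s)),
                   p ++ i :: z2') := by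
              have : (elementsGo rest' (p.length + 1) buffer ((p ++ [i]) ++ z2)) =
                  ((elementsGo rest' (p.length + 1) buffer ((p ++ [i]) ++ z2)).1,
                   (elementsGo rest' (p.length + 1) buffer ((p ++ [i]) ++ z2)).2) := rfl
              rw [this, h1, h2]
              simp
            have := ihl (buffer ++ (pvProd rest').map (fun s => pvJoinSp (p ++ i :: s)))
              i z2' (by omega)
            constructor
            · simp only [List.foldl_cons, hset, hrec]
              rw [this.1]
              simp
            · obtain ⟨c', z2'', hlen'', heq''⟩ := this.2
              refine ⟨c', z2'', by omega, ?_⟩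
              simp only [List.foldl_cons, hset, hrec]
              exact heq''

lemma foldl_tuples (tc : List Int) :
    ∀ ts : List (List Int),
      tc.foldl
        (fun ts n => ts.flatMap (fun t => (PySem.List.pyRange 0 n 1).map (fun i => t ++ [i])))
        ts
      = ts.flatMap (fun t => (pvProd tc).map (t ++ ·)) := by
  induction tc with
  | nil => intro ts; simp [pvProd]
  | cons n tc' ih =>
      intro ts
      rw [List.foldl_cons, ih]
      simp [pvProd, List.flatMap_assoc, List.map_flatMap, List.flatMap_map, Function.comp_def,
        List.append_assoc]

lemma pvProd_eq_nil_of_le (tc : List Int) (n : Int) (hn : n ∈ tc) (h0 : n ≤ 0) :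
    pvProd tc = [] := by
  induction tc with
  | nil => cases hn
  | cons m tc' ih =>
      rcases List.mem_cons.mp hn with h | h
      · subst h
        have hr : PySem.List.pyRange 0 n 1 = [] := by
          rw [PySem.List.pyRange_one]
          have h1 : (n - 0).toNat = 0 := by omega
          rw [h1]; simp
        simp [pvProd, hr]
      · have h2 := ih h
        unfold pvProd at h2 ⊢
        simp [h2]

lemma elements_eq_prod (tc : List Int) : elements tc = (pvProd tc).map pvJoinSp := by
  unfold elements
  have h := (elementsGo_spec tc [] (List.replicate tc.length 0) [] (by simp)).1
  simp only [List.length_nil, List.nil_append] at h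
  rw [h]

-- ===== VERDICT (by name: the statement is the Claim_ definition above) =====
theorem elements_spec : Claim_equal_elements := by
  intro tc _
  unfold Spec_elements elements_alt
  rw [elements_eq_prod]
  by_cases hz : tc.any (fun n => decide (n ≤ 0))
  · obtain ⟨n, hn, h0⟩ := List.any_eq_true.mp hz
    simp [hz, pvProd_eq_nil_of_le tc n hn (by simpa using h0)]
  · rw [if_neg hz, foldl_tuples]
    simp
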